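-- pv_equiv track=rewrite | github.com/kdh949/multimodal-equity-research | src/quant_research/validation/ablation.py | feature_family_columns
-- ===== SOURCE A (Python) =====
-- from collections.abc import Iterable, Iterator
-- from typing import Literal
--
-- FeatureFamily = Literal["price", "text", "sec", "chronos", "granite_ttm"]
--
-- FEATURE_FAMILY_ORDER: tuple[FeatureFamily, ...] = (
--     "price",
--     "text",
--     "sec",
--     "chronos",
--     "granite_ttm",
-- )
--
-- ABLATION_NON_FEATURE_COLUMNS: frozenset[str] = frozenset({"date", "ticker"})
--
-- def feature_family_for_column(column: str) -> FeatureFamily | None: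
--     column = str(column)
--     if column in ABLATION_NON_FEATURE_COLUMNS or column.startswith("forward_return_"):
--         return None
--     if column.startswith("chronos_"):
--         return "chronos"
--     if column.startswith("granite_ttm_"):
--         return "granite_ttm"
--     if column.startswith(("news_", "text_")):
--         return "text"
--     if column.startswith(("sec_", "revenue_", "net_income_", "assets_")):
--         return "sec"
--     return "price"
--
-- def feature_family_columns(columns: Iterable[str]) -> dict[FeatureFamily, tuple[str, ...]]:
--     grouped: dict[FeatureFamily, list[str]] = {family: [] for family in FEATURE_FAMILY_ORDER}
--     for column in columns:
--         family = feature_family_for_column(column)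
--         if family is not None:
--             grouped[family].append(str(column))
--     return {
--         family: tuple(grouped[family])
--         for family in FEATURE_FAMILY_ORDER
--         if grouped[family]
--     }
-- ===== SOURCE B (Python) =====
-- FEATURE_FAMILY_ORDER = ("price", "text", "sec", "chronos", "granite_ttm")
-- ABLATION_NON_FEATURE_COLUMNS = frozenset({"date", "ticker"})
--
-- def feature_family_for_column(column):
--     column = str(column)
--     if column in ABLATION_NON_FEATURE_COLUMNS or column.startswith("forward_return_"):
--         return None
--     if column.startswith("chronos_"):
--         return "chronos"
--     if column.startswith("granite_ttm_"):
--         return "granite_ttm"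
--     if column.startswith(("news_", "text_")):
--         return "text"
--     if column.startswith(("sec_", "revenue_", "net_income_", "assets_")):
--         return "sec"
--     return "price"
--
-- def feature_family_columns(columns):
--     cols = [str(c) for c in columns]
--     result = {}
--     for family in FEATURE_FAMILY_ORDER:
--         members = tuple(c for c in cols if feature_family_for_column(c) == family)
--         if members:
--             result[family] = members
--     return result
-- ===== Notes on version B (the rewrite author's own statement) =====
-- stated objective: simpler
-- what changed: A buckets columns in one pass into a pre-initialized dict of lists and then emits non-empty families; B drops the dict entirely and, for each family in FEATURE_FAMILY_ORDER, filters the columns belonging to it, keeping the group only if non-empty.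
import Mathlib
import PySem

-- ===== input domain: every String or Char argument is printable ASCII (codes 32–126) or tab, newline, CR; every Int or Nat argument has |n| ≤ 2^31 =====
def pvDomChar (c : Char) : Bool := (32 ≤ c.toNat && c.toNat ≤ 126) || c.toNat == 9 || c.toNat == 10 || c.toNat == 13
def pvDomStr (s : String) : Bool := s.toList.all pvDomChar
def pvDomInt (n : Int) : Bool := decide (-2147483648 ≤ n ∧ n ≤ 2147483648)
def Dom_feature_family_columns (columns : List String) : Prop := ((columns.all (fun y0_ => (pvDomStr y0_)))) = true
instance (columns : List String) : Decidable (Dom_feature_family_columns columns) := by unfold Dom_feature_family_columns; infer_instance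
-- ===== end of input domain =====

-- B replaces A's one-pass dict bucketing by a per-family filter over the columns (simpler: no dict, no pre-initialized buckets).

-- ===== PORT A =====
-- shared module helper feature_family_for_column (identical source in Source A and Source B)
def FEATURE_FAMILY_ORDER : List String := ["price", "text", "sec", "chronos", "granite_ttm"]

def feature_family_for_column (column : String) : Option String :=
  -- 'column in ABLATION_NON_FEATURE_COLUMNS' = membership in the frozenset {"date","ticker"}
  if column = "date" ∨ column = "ticker" ∨ PySem.Str.startswith column "forward_return_" then none
  else if PySem.Str.startswith column "chronos_" then some "chronos"
  else if PySem.Str.startswith column "granite_ttm_" then some "granite_ttm"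
  else if PySem.Str.startswith column "news_" ∨ PySem.Str.startswith column "text_" then some "text"
  else if PySem.Str.startswith column "sec_" ∨ PySem.Str.startswith column "revenue_" ∨
          PySem.Str.startswith column "net_income_" ∨ PySem.Str.startswith column "assets_" then some "sec"
  else some "price"

def feature_family_columns (columns : List String) : List (String × List String) :=
  let grouped : PySem.Dict String (List String) :=
    FEATURE_FAMILY_ORDER.foldl (fun g fam => g.insert fam []) PySem.Dict.empty
  let grouped := columns.foldl (fun g column =>
      match feature_family_for_column column with
      | some family => g.modify family [] (fun l => l ++ [column])  -- grouped[family].append(column); key always present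
      | none => g) grouped
  -- final dict comprehension over FEATURE_FAMILY_ORDER keeping non-empty families
  FEATURE_FAMILY_ORDER.foldl (fun res family =>
      let l := grouped.getD family []  -- grouped[family]; key always present
      if l = [] then res else res ++ [(family, l)]) []

-- ===== PORT B =====
def feature_family_columns_alt (columns : List String) : List (String × List String) :=
  FEATURE_FAMILY_ORDER.foldl (fun res family =>
      let members := columns.filter (fun c => feature_family_for_column c == some family)
      if members = [] then res else res ++ [(family, members)]) []

-- ===== PRECONDITION & SPEC =====
def Spec_feature_family_columns (columns : List String) (out : List (String × List String)) : Prop := out = feature_family_columns_alt columns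
instance (columns : List String) (out : List (String × List String)) : Decidable (Spec_feature_family_columns columns out) := by unfold Spec_feature_family_columns; infer_instance

-- ===== CLAIM (what is proved, stated in full; the proofs are below) =====
def Claim_equal_feature_family_columns : Prop := ∀ (columns : List String), Dom_feature_family_columns columns → Spec_feature_family_columns columns (feature_family_columns columns)

-- ===== LEMMAS AND PROOFS =====

-- invariant of A's bucketing loop: each bucket collects exactly the columns of its family
theorem loop_getD (fam : String) (l : List String) :
    ∀ (d : PySem.Dict String (List String)),
    (l.foldl (fun g column =>
        match feature_family_for_column column with
        | some family => g.modify family [] (fun t => t ++ [column])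
        | none => g) d).getD fam []
      = d.getD fam [] ++ l.filter (fun c => feature_family_for_column c == some fam) := by
  induction l with
  | nil => intro d; simp
  | cons c l ih =>
    intro d
    simp only [List.foldl_cons, List.filter_cons]
    cases h : feature_family_for_column c with
    | none => simp [ih]
    | some f =>
      by_cases hf : f = fam
      · subst hf
        simp [ih]
      · have hb : ((some f == some fam) : Bool) = false := by
          simp; exact hf
        simp only [ih, PySem.Dict.getD_modify, hb, Bool.false_eq_true, if_false]
        rw [if_neg (fun hfe => hf hfe.symm)]

theorem feature_family_columns_eq (columns : List String) :
    feature_family_columns columns = feature_family_columns_alt columns := by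
  unfold feature_family_columns feature_family_columns_alt
  simp only [FEATURE_FAMILY_ORDER, List.foldl_cons, List.foldl_nil, loop_getD]
  norm_num [PySem.Dict.getD_insert, PySem.Dict.getD_empty]

-- ===== VERDICT (by name: the statement is the Claim_ definition above) =====
theorem feature_family_columns_spec : Claim_equal_feature_family_columns := by
  intro columns _
  exact feature_family_columns_eq columns
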